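-- pv_equiv track=rewrite | github.com/rufuma/hub-bcvp | 张智睿/week15/bpe_project/bpe_trainer.py | _merge_pair_in_tokens
-- ===== SOURCE A (Python) =====
-- from typing import Dict, List, Tuple, Iterable, Optional
--
-- def _merge_pair_in_tokens(tokens: Tuple[str, ...], pair: Tuple[str, str]) -> Tuple[str, ...]:
--     a, b = pair
--     out: List[str] = []
--     i = 0
--     n = len(tokens)
--     while i < n:
--         if i < n - 1 and tokens[i] == a and tokens[i + 1] == b:
--             out.append(a + b)
--             i += 2
--         else:
--             out.append(tokens[i])
--             i += 1
--     return tuple(out)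
-- ===== SOURCE B (Python) =====
-- def _merge_pair_in_tokens(tokens, pair):
--     a, b = pair
--     out = []
--     pending = False  # True means a previous token equal to `a` is deferred, awaiting a `b`
--     for t in tokens:
--         if pending:
--             if t == b:
--                 out.append(a + b)
--                 pending = False
--             elif t == a:
--                 out.append(a)  # flush the deferred `a`, current token becomes the new pending `a`
--             else:
--                 out.append(a)
--                 out.append(t)
--                 pending = False
--         else:
--             if t == a:
--                 pending = True
--             else:
--                 out.append(t)
--     if pending:
--         out.append(a)
--     return tuple(out)
-- ===== Notes on version B (the rewrite author's own statement) =====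
-- stated objective: alternative
-- what changed: Replaces the index-based while loop with lookahead (tokens[i], tokens[i+1], skip by 2) by a single forward pass iterating directly over the tokens with a boolean pending state that defers an `a` until the next token decides whether to merge; no indexing or length checks at all.
import Mathlib
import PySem

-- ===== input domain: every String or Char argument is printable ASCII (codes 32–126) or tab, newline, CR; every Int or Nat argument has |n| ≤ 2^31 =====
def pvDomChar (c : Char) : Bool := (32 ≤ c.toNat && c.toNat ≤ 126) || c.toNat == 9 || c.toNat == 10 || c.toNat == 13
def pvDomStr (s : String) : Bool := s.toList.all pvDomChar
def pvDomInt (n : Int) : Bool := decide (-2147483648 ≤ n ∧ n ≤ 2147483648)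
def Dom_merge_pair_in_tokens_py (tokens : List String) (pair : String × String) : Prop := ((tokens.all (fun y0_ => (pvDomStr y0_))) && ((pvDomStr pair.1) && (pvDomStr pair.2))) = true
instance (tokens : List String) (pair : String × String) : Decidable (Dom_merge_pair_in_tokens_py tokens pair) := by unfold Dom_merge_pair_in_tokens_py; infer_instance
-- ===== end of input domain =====

-- B replaces A's index/lookahead while-loop by a single forward pass with a boolean
-- pending state (a deferred `a` awaiting a `b`); same result, different decomposition.


-- ===== PORT A =====
-- A's while loop over index i; tokens.getD i "" is exact here since every access has i < n.
def mergeGoA (tokens : List String) (n : Nat) (a b : String) (i : Nat) (out : List String) : List String :=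
  if _h : i < n then
    if i < n - 1 ∧ tokens.getD i "" = a ∧ tokens.getD (i + 1) "" = b then
      mergeGoA tokens n a b (i + 2) (out ++ [a ++ b])
    else
      mergeGoA tokens n a b (i + 1) (out ++ [tokens.getD i ""])
  else out
termination_by n - i

def merge_pair_in_tokens_py (tokens : List String) (pair : String × String) : List String :=
  mergeGoA tokens tokens.length pair.1 pair.2 0 []

-- ===== PORT B =====
-- B's forward pass: `pending = true` means a token equal to `a` is deferred, awaiting a `b`.
def mergeGoB (a b : String) : List String → List String → Bool → List String
  | [], out, pending => if pending then out ++ [a] else out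
  | t :: rest, out, pending =>
    if pending then
      if t = b then mergeGoB a b rest (out ++ [a ++ b]) false
      else if t = a then mergeGoB a b rest (out ++ [a]) true
      else mergeGoB a b rest (out ++ [a, t]) false
    else
      if t = a then mergeGoB a b rest out true
      else mergeGoB a b rest (out ++ [t]) false

def merge_pair_in_tokens_py_alt (tokens : List String) (pair : String × String) : List String :=
  mergeGoB pair.1 pair.2 tokens [] false

-- ===== PRECONDITION & SPEC =====
def Spec_merge_pair_in_tokens_py (tokens : List String) (pair : String × String) (out : List String) : Prop := out = merge_pair_in_tokens_py_alt tokens pair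
instance (tokens : List String) (pair : String × String) (out : List String) : Decidable (Spec_merge_pair_in_tokens_py tokens pair out) := by unfold Spec_merge_pair_in_tokens_py; infer_instance

-- ===== CLAIM (what is proved, stated in full; the proofs are below) =====
def Claim_equal_merge_pair_in_tokens_py : Prop := ∀ (tokens : List String) (pair : String × String), Dom_merge_pair_in_tokens_py tokens pair → Spec_merge_pair_in_tokens_py tokens pair (merge_pair_in_tokens_py tokens pair)

-- ===== LEMMAS AND PROOFS =====

-- reference function: greedy non-overlapping merge by two-element lookahead
def mergeRef (a b : String) : List String → List String
  | [] => []
  | [t] => [t]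
  | t :: u :: rest =>
    if t = a ∧ u = b then (a ++ b) :: mergeRef a b rest
    else t :: mergeRef a b (u :: rest)
termination_by l => l.length

lemma mergeRef_cons_ne (a b t : String) (l : List String) (ht : t ≠ a) :
    mergeRef a b (t :: l) = t :: mergeRef a b l := by
  cases l with
  | nil => simp [mergeRef]
  | cons u rest => simp [mergeRef, ht]

lemma mergeGoA_eq_aux (tokens : List String) (a b : String) :
    ∀ k i out, tokens.length - i ≤ k →
      mergeGoA tokens tokens.length a b i out = out ++ mergeRef a b (tokens.drop i) := by
  intro k
  induction k with
  | zero =>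
    intro i out hk
    rw [mergeGoA]
    have h : ¬ i < tokens.length := by omega
    rw [dif_neg h]
    have : tokens.drop i = [] := List.drop_eq_nil_of_le (by omega)
    simp [this, mergeRef]
  | succ k ih =>
    intro i out hk
    rw [mergeGoA]
    by_cases h : i < tokens.length
    · have hdrop : tokens.drop i = tokens[i] :: tokens.drop (i + 1) :=
        List.drop_eq_getElem_cons h
      have hget : tokens.getD i "" = tokens[i] := List.getD_eq_getElem _ _ h
      by_cases hc : i < tokens.length - 1 ∧ tokens.getD i "" = a ∧ tokens.getD (i + 1) "" = b
      · obtain ⟨h1, h2, h3⟩ := hc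
        have h1' : i + 1 < tokens.length := by omega
        have hdrop' : tokens.drop (i + 1) = tokens[i + 1] :: tokens.drop (i + 2) :=
          List.drop_eq_getElem_cons h1'
        have hget' : tokens.getD (i + 1) "" = tokens[i + 1] := List.getD_eq_getElem _ _ h1'
        rw [dif_pos h, if_pos ⟨h1, h2, h3⟩, ih (i + 2) _ (by omega), hdrop, hdrop', mergeRef]
        rw [hget] at h2; rw [hget'] at h3
        simp [h2, h3]
      · rw [dif_pos h, if_neg hc, ih (i + 1) _ (by omega), hdrop]
        have heq : mergeRef a b (tokens[i] :: tokens.drop (i + 1))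
            = tokens[i] :: mergeRef a b (tokens.drop (i + 1)) := by
          cases hd : tokens.drop (i + 1) with
          | nil => simp [mergeRef]
          | cons u rest =>
            have h1' : i + 1 < tokens.length := by
              by_contra hle
              have hnil : tokens.drop (i + 1) = [] := List.drop_eq_nil_of_le (by omega)
              rw [hd] at hnil; simp at hnil
            have h1 : i < tokens.length - 1 := by omega
            have hu : u = tokens[i + 1] := by
              have heq2 := List.drop_eq_getElem_cons h1'
              rw [hd] at heq2
              injection heq2
            by_cases hta : tokens[i] = a
            · have hub : u ≠ b := by
                intro hub
                exact hc ⟨h1, hget ▸ hta, by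
                  rw [List.getD_eq_getElem _ _ h1', ← hu]; exact hub⟩
              simp [mergeRef, hub]
            · simp [mergeRef, hta]
        rw [heq]; simp [List.getElem?_eq_getElem h]
    · rw [dif_neg h]
      have : tokens.drop i = [] := List.drop_eq_nil_of_le (by omega)
      simp [this, mergeRef]

lemma mergeGoA_eq (tokens : List String) (a b : String) (i : Nat) (out : List String) :
    mergeGoA tokens tokens.length a b i out = out ++ mergeRef a b (tokens.drop i) :=
  mergeGoA_eq_aux tokens a b tokens.length i out (by omega)

lemma mergeGoB_eq (a b : String) :
    ∀ (l out : List String) (pending : Bool),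
      mergeGoB a b l out pending
        = out ++ (if pending then mergeRef a b (a :: l) else mergeRef a b l) := by
  intro l
  induction l with
  | nil =>
    intro out pending
    cases pending <;> simp [mergeGoB, mergeRef]
  | cons t rest ih =>
    intro out pending
    cases pending with
    | true =>
      by_cases hb : t = b
      · simp only [mergeGoB, if_pos hb, ih, mergeRef]
        subst hb; simp
      · by_cases ha : t = a
        · simp only [mergeGoB, if_neg hb, if_pos ha, ih]
          subst ha; simp [mergeRef, hb]
        · simp only [mergeGoB, if_neg hb, if_neg ha, ih]
          have h1 : mergeRef a b (a :: t :: rest) = a :: mergeRef a b (t :: rest) := by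
            simp [mergeRef, hb]
          have h2 := mergeRef_cons_ne a b t rest ha
          simp [h1, h2]
    | false =>
      by_cases ha : t = a
      · simp only [mergeGoB, if_neg (Bool.false_ne_true), if_pos ha, ih]
        subst ha; simp
      · simp only [mergeGoB, if_neg (Bool.false_ne_true), if_neg ha, ih]
        rw [mergeRef_cons_ne a b t rest ha]; simp

-- ===== VERDICT (by name: the statement is the Claim_ definition above) =====
theorem merge_pair_in_tokens_py_spec : Claim_equal_merge_pair_in_tokens_py := by
  intro tokens pair _
  show merge_pair_in_tokens_py tokens pair = merge_pair_in_tokens_py_alt tokens pair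
  rw [merge_pair_in_tokens_py, merge_pair_in_tokens_py_alt,
    mergeGoA_eq, mergeGoB_eq]
  simp
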